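-- pv_equiv track=rewrite | github.com/OpenPecha/extract-opf-glyphs | src/glyph_extraction_automation/get_segment_info.py | divide_text_into_segments
-- ===== SOURCE A (Python) =====
-- def divide_text_into_segments(text):
--     lines = text.split('\n')
--     num_lines = len(lines)
--     if num_lines < 2:
--         raise ValueError("txt must have 2 lines for segmentation.")
--
--     mid = num_lines // 2
--     top_half = lines[:mid]
--     bottom_half = lines[mid:]
--
--     segment_width = len(top_half[0]) // 8 if top_half else 0
--
--     top_segments = []
--     bottom_segments = []
--
--     for i in range(8):
--         top_segments.append([line[i * segment_width:(i + 1) * segment_width] for line in top_half])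
--         bottom_segments.append([line[i * segment_width:(i + 1) * segment_width] for line in bottom_half])
--
--     return top_segments, bottom_segments
-- ===== SOURCE B (Python) =====
-- def divide_text_into_segments(text):
--     lines = text.split('\n')
--     if len(lines) < 2:
--         raise ValueError("txt must have 2 lines for segmentation.")
--     mid = len(lines) // 2
--     w = len(lines[0]) // 8
--
--     def split_line(line):
--         return [line[j * w:(j + 1) * w] for j in range(8)]
--
--     def columns(half):
--         return [list(group) for group in zip(*(split_line(line) for line in half))]
--
--     return columns(lines[:mid]), columns(lines[mid:])
-- ===== Notes on version B (the rewrite author's own statement) =====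
-- stated objective: alternative
-- what changed: B cuts each line into its 8 fixed-width pieces first and then transposes the rows with zip(*rows), instead of A's column-outside/line-inside double loop that re-slices every line once per column index.
import Mathlib
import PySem

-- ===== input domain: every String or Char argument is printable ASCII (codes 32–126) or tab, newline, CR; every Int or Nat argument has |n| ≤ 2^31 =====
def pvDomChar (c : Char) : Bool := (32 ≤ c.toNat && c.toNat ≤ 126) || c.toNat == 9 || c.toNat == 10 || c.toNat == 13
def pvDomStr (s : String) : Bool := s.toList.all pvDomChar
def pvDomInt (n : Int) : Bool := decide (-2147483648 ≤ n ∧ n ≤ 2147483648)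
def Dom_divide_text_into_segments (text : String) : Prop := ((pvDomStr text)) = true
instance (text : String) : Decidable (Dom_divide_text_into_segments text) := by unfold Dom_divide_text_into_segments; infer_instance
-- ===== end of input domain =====

-- B re-decomposes A's column-outside/line-inside loops as per-line 8-way splits followed by a zip(*rows) transpose;
-- same cost, different traversal (objective: alternative). A raises ValueError on texts without a newline; Pre_ excludes those.

-- ===== PORT A =====
def divide_text_into_segments (text : String) : List (List String) × List (List String) :=
  let lines := (PySem.Str.split? text "\n").getD []
  if lines.length < 2 then ([], [])
  else
    let mid : Int := PySem.Int.floordiv (lines.length : Int) 2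
    let top_half := PySem.List.slice lines none (some mid)
    let bottom_half := PySem.List.slice lines (some mid) none
    let segment_width : Int :=
      match top_half with
      | [] => 0
      | h :: _ => PySem.Int.floordiv (PySem.Str.len h) 8
    (PySem.List.pyRange 0 8 1).foldl
      (fun (acc : List (List String) × List (List String)) (i : Int) =>
        (acc.1 ++ [top_half.map (fun line => PySem.Str.slice line (some (i * segment_width)) (some ((i + 1) * segment_width)))],
         acc.2 ++ [bottom_half.map (fun line => PySem.Str.slice line (some (i * segment_width)) (some ((i + 1) * segment_width)))]))
      ([], [])

-- ===== PORT B =====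
-- Source B's split_line: the 8 fixed-width pieces of one line (Python slice bounds here are nonnegative, so drop/take is exact)
def pvSplitLine8 (w : Nat) (line : String) : List String :=
  (List.range 8).map (fun j => String.ofList ((line.toList.drop (j * w)).take w))

def pvZipStar (rows : List (List String)) : List (List String) :=
  if _h : rows ≠ [] ∧ rows.all (fun r => !r.isEmpty) then
    (rows.map (fun r => r.headD "")) :: pvZipStar (rows.map List.tail)
  else []
termination_by (rows.map List.length).sum
decreasing_by
  obtain ⟨hne, hall⟩ := _h
  match rows, hne with
  | r :: rs, _ =>
    simp only [List.all_cons, Bool.and_eq_true, Bool.not_eq_eq_eq_not, Bool.not_true] at hall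
    have hr : r ≠ [] := by intro hre; simp [hre] at hall
    have h1 : r.tail.length < r.length := by
      cases r with
      | nil => exact absurd rfl hr
      | cons a as => simp
    have h2 : (rs.map (fun a => a.tail.length)).sum ≤ (rs.map List.length).sum :=
      List.sum_le_sum (fun x _ => by simp [List.length_tail])
    simp only [List.map_attach_eq_pmap, List.pmap_eq_map, List.map_map, Function.comp_def, List.map_cons, List.sum_cons]
    omega

def divide_text_into_segments_alt (text : String) : List (List String) × List (List String) :=
  let lines := (PySem.Str.split? text "\n").getD []
  if lines.length < 2 then ([], [])                   -- the raise in Source B (excluded by Pre_)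
  else
    let mid := lines.length / 2
    let w := (lines.headD "").toList.length / 8
    let columns := fun (half : List String) => pvZipStar (half.map (pvSplitLine8 w))
    (columns (lines.take mid), columns (lines.drop mid))

-- ===== PRECONDITION & SPEC =====
-- A raises ValueError when splitting on newlines yields fewer than 2 pieces, i.e. when text contains no newline character.
def Pre_divide_text_into_segments (text : String) : Prop := '\n' ∈ text.toList
instance (text : String) : Decidable (Pre_divide_text_into_segments text) := by unfold Pre_divide_text_into_segments; infer_instance
def pvWitness_divide_text_into_segments : String := "abcdefgh\nijklmnop"

def Spec_divide_text_into_segments (text : String) (out : List (List String) × List (List String)) : Prop := out = divide_text_into_segments_alt text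
instance (text : String) (out : List (List String) × List (List String)) : Decidable (Spec_divide_text_into_segments text out) := by unfold Spec_divide_text_into_segments; infer_instance

-- ===== CLAIM (what is proved, stated in full; the proofs are below) =====
def Claim_equal_divide_text_into_segments : Prop := ∀ (text : String), Dom_divide_text_into_segments text → Pre_divide_text_into_segments text → Spec_divide_text_into_segments text (divide_text_into_segments text)

-- ===== LEMMAS AND PROOFS =====

-- splitOn's worker returns at least one piece more than the accumulator
lemma go_len_ge (fuel : Nat) (l cur : List Char) (acc : List (List Char)) :
    acc.length + 1 ≤ (PySem.Chars.splitOn.go ['\n'] fuel l cur acc).length := by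
  induction fuel generalizing l cur acc with
  | zero => rw [PySem.Chars.splitOn.go.eq_def]; simp
  | succ fuel ih =>
    rw [PySem.Chars.splitOn.go.eq_def]
    cases l with
    | nil => simp
    | cons c rest =>
      by_cases hp : List.isPrefixOf ['\n'] (c :: rest) = true
      · simp only [hp, if_true]
        have := ih (List.drop 1 (c :: rest)) [] (cur.reverse :: acc)
        simp at this ⊢
        omega
      · simp only [hp]
        simp only [Bool.not_eq_true] at hp
        simp
        exact ih rest (c :: cur) acc

-- and at least two more when the separator occurs in the remaining input
lemma go_len_two (fuel : Nat) (l cur : List Char) (acc : List (List Char))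
    (hf : l.length < fuel) (hmem : '\n' ∈ l) :
    acc.length + 2 ≤ (PySem.Chars.splitOn.go ['\n'] fuel l cur acc).length := by
  induction fuel generalizing l cur acc with
  | zero => omega
  | succ fuel ih =>
    rw [PySem.Chars.splitOn.go.eq_def]
    cases l with
    | nil => simp at hmem
    | cons c rest =>
      by_cases hp : List.isPrefixOf ['\n'] (c :: rest) = true
      · simp only [hp, if_true]
        have := go_len_ge fuel (List.drop 1 (c :: rest)) [] (cur.reverse :: acc)
        simp at this ⊢
        omega
      · simp only [hp]
        simp only [Bool.not_eq_true] at hp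
        simp
        have hc : c ≠ '\n' := by
          intro rfl_c
          subst rfl_c
          simp [List.isPrefixOf] at hp
        have hmem' : '\n' ∈ rest := by
          cases hmem with
          | head => exact absurd rfl hc
          | tail _ h => exact h
        have hf' : rest.length < fuel := by simp at hf; omega
        exact ih rest (c :: cur) acc hf' hmem'

-- a newline in the text forces text.split('\\n') to have at least 2 pieces (Pre_ rules out A's raise)
lemma newline_two_lines (text : String) (h : '\n' ∈ text.toList) :
    2 ≤ ((PySem.Str.split? text "\n").getD []).length := by
  have : PySem.Str.split? text "\n" =
      some ((PySem.Chars.splitOn text.toList ['\n']).map String.ofList) := by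
    simp [PySem.Str.split?, PySem.Chars.split?]
  rw [this]
  simp only [Option.getD_some, List.length_map]
  unfold PySem.Chars.splitOn
  have := go_len_two (text.toList.length + 1) text.toList [] [] (by omega) h
  simpa using this

-- zip(*rows) on a nonempty list of rows that all have the (range n)-shape IS the transpose
lemma pvZipStar_rect {α : Type} (n : Nat) (xs : List α) (hx : xs ≠ []) (f : α → Nat → String) :
    pvZipStar (xs.map (fun x => (List.range n).map (f x))) =
      (List.range n).map (fun j => xs.map (fun x => f x j)) := by
  induction n generalizing f with
  | zero =>
    rw [pvZipStar]
    obtain ⟨x, xs', rfl⟩ := List.exists_cons_of_ne_nil hx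
    simp
  | succ n ih =>
    rw [pvZipStar]
    rw [List.range_succ_eq_map]
    have hcond : (xs.map (fun x => (0 :: (List.range n).map Nat.succ).map (f x))) ≠ [] ∧
        (xs.map (fun x => (0 :: (List.range n).map Nat.succ).map (f x))).all (fun r => !r.isEmpty) := by
      refine ⟨by simp [hx], by simp⟩
    rw [dif_pos hcond]
    simp only [List.map_map, Function.comp_def, List.map_cons, List.headD_cons, List.tail_cons]
    rw [ih (fun x j => f x j.succ)]

-- ===== VERDICT (by name: the statement is the Claim_ definition above) =====
theorem divide_text_into_segments_spec : Claim_equal_divide_text_into_segments := by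
  intro text _ hpre
  unfold Spec_divide_text_into_segments
  have hge := newline_two_lines text hpre
  simp only [divide_text_into_segments, divide_text_into_segments_alt]
  revert hge
  generalize (PySem.Str.split? text "\n").getD [] = lines
  intro h2
  rw [if_neg (by omega : ¬ lines.length < 2), if_neg (by omega : ¬ lines.length < 2)]
  obtain ⟨l0, t0, rfl⟩ := List.exists_cons_of_ne_nil (by rintro rfl; simp at h2 : lines ≠ [])
  obtain ⟨l1, rest, rfl⟩ := List.exists_cons_of_ne_nil (by rintro rfl; simp at h2 : t0 ≠ [])
  -- names
  set L : List String := l0 :: l1 :: rest with hL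
  set m : Nat := L.length / 2 with hm
  set w : Nat := l0.toList.length / 8 with hw
  have hlen : L.length = rest.length + 2 := by simp [hL]
  have hm1 : 1 ≤ m := by rw [hm, hlen]; omega
  have hmlt : m < L.length := by rw [hm, hlen]; omega
  -- mid as a Nat cast
  have hmid : PySem.Int.floordiv ((L.length : Nat) : Int) 2 = ((m : Nat) : Int) := by
    exact_mod_cast PySem.Int.floordiv_natCast L.length 2
  rw [hmid, PySem.List.slice_to_natCast, PySem.List.slice_from_natCast]
  -- top half is a cons with head l0
  have htop : L.take m = l0 :: ((l1 :: rest).take (m - 1)) := by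
    obtain ⟨k, hk⟩ : ∃ k, m = k + 1 := ⟨m - 1, by omega⟩
    rw [hL, hk]
    simp
  have hsw : PySem.Int.floordiv (PySem.Str.len l0) 8 = ((w : Nat) : Int) := by
    rw [PySem.Str.len_eq, hw]
    exact_mod_cast PySem.Int.floordiv_natCast l0.toList.length 8
  rw [htop]
  simp only [hsw]
  -- the A loop over range(8)
  have hrange : PySem.List.pyRange 0 8 1 = List.map (fun k => Int.ofNat k) (List.range 8) := by decide
  rw [hrange,
      PySem.List.foldl_prod_mk
        (fun acc i => acc ++ [(l0 :: (l1 :: rest).take (m-1)).map (fun line => PySem.Str.slice line (some (i * (w : Int))) (some ((i + 1) * (w : Int))))])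
        (fun acc i => acc ++ [(L.drop m).map (fun line => PySem.Str.slice line (some (i * (w : Int))) (some ((i + 1) * (w : Int))))])]
  rw [PySem.List.foldl_append_singleton_eq_map, PySem.List.foldl_append_singleton_eq_map]
  simp only [List.nil_append, List.map_map]
  -- B side: headD and the two halves
  have hhead : L.headD "" = l0 := by rw [hL]; rfl
  simp only [hhead, ← hw]
  rw [← htop]
  have hb1 : L.take m ≠ [] := by rw [htop]; simp
  have hb2 : L.drop m ≠ [] := by
    intro h
    have := congrArg List.length h
    simp at this
    omega
  unfold pvSplitLine8
  rw [pvZipStar_rect 8 (L.take m) hb1 (fun line j => String.ofList ((line.toList.drop (j * w)).take w)),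
      pvZipStar_rect 8 (L.drop m) hb2 (fun line j => String.ofList ((line.toList.drop (j * w)).take w))]
  refine congrArg₂ Prod.mk ?_ ?_ <;>
  · refine List.map_congr_left (fun j hj => ?_)
    refine List.map_congr_left (fun line hline => ?_)
    show PySem.Str.slice line (some ((j : Int) * (w : Int))) (some (((j : Int) + 1) * (w : Int))) = _
    have e1 : ((j : Int) * (w : Int)) = ((j * w : Nat) : Int) := by push_cast; ring
    have e2 : (((j : Int) + 1) * (w : Int)) = ((j * w + w : Nat) : Int) := by push_cast; ring
    rw [e1, e2]
    show String.ofList (PySem.Chars.slice line.toList _ _) = _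
    unfold PySem.Chars.slice
    rw [PySem.List.slice_natCast]
    congr 1
    congr 1
    omega
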